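-- pv_equiv track=rewrite | github.com/zeyongj/LeetCode | 0759-set-intersection-size-at-least-two/0759-set-intersection-size-at-least-two.py | intersectionSizeTwo
-- ===== SOURCE A (Python) =====
-- from typing import List
--
-- def intersectionSizeTwo(intervals: List[List[int]]) -> int:
--     intervals.sort(key=lambda x: (x[1], -x[0]))
--
--     ans = 0
--     a, b = -1, -1
--
--     for l, r in intervals:
--         if l > b:
--             a = r - 1
--             b = r
--             ans += 2
--         elif l > a:
--             a = b
--             b = r
--             ans += 1
--
--     return ans
-- ===== SOURCE B (Python) =====
-- def intersectionSizeTwo(intervals):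
--     # selection instead of sorting: work through a throwaway list of encoded
--     # (end, -start) pairs, repeatedly extracting the lexicographically smallest
--     todo = [(iv[1], -iv[0]) for iv in intervals]
--     a = b = -1
--     ans = 0
--     while todo:
--         m = min(todo)
--         todo.remove(m)
--         r, negl = m
--         l = -negl
--         # how many of the two tracked points miss [l, r]: branch-free count
--         need = 2 - (l <= a) - (l <= b)
--         ans += need
--         if need == 2:
--             a, b = r - 1, r
--         elif need == 1:
--             a, b = b, r
--     return ans
-- ===== Notes on version B (the rewrite author's own statement) =====
-- stated objective: alternative
-- what changed: B never sorts and never classifies with an if/elif chain: it encodes each interval as an (end, -start) pair in a throwaway worklist, repeatedly extracts the lexicographically minimal pair (selection, O(n^2) worst case), and computes each step's point deficit arithmetically as 2 - (l<=a) - (l<=b); the Lean proof shows the selection sequence coincides with A's stable sort and the deficit fold preserves A's state invariant.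
import Mathlib
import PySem

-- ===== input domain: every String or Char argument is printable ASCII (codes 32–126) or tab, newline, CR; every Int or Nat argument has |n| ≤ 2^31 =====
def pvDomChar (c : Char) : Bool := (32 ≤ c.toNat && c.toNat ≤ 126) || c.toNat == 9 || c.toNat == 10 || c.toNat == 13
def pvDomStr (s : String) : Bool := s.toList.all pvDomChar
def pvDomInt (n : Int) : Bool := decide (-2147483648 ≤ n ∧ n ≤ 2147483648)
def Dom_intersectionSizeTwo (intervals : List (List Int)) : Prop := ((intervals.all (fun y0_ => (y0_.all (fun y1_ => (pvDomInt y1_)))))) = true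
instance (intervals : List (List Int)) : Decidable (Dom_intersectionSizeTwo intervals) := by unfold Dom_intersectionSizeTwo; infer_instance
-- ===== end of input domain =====

-- B replaces the library sort + if/elif scan by repeated extraction of the minimal
-- encoded (end, -start) pair from a worklist and a branch-free deficit count; the
-- equivalence is about the return value only: Python A sorts its argument in place,
-- B does not mutate it.

-- ===== PORT A =====
def intersectionSizeTwo (intervals : List (List Int)) : Int :=
  let srt := PySem.List.sorted2 intervals (fun x => x.getD 1 0) (fun x => -(x.getD 0 0))
  let res := srt.foldl (fun (st : Int × Int × Int) iv =>
      let l := iv.getD 0 0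
      let r := iv.getD 1 0
      if l > st.2.2 then (st.1 + 2, r - 1, r)
      else if l > st.2.1 then (st.1 + 1, st.2.2, r)
      else st)
    (0, -1, -1)
  res.1

-- ===== PORT B =====
-- Source B's `min(todo)` on int pairs, ported by hand: CPython's left-to-right fold
-- keeping the current minimum, replacing it only when the candidate is strictly
-- smaller in lexicographic tuple order; exact for pairs of ints.
def pyMinPair (x : Int × Int) (xs : List (Int × Int)) : Int × Int :=
  xs.foldl (fun c y => if y.1 < c.1 ∨ (y.1 = c.1 ∧ y.2 < c.2) then y else c) x

lemma pyMinPair_mem (x : Int × Int) (xs : List (Int × Int)) :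
    pyMinPair x xs ∈ x :: xs := by
  unfold pyMinPair
  induction xs generalizing x with
  | nil => simp
  | cons y ys ih =>
    simp only [List.foldl_cons]
    by_cases h : y.1 < x.1 ∨ (y.1 = x.1 ∧ y.2 < x.2)
    · rw [if_pos h]
      exact List.mem_cons_of_mem x (ih y)
    · rw [if_neg h]
      rcases List.mem_cons.mp (ih x) with h1 | h1
      · rw [h1]; exact List.mem_cons_self
      · exact List.mem_cons_of_mem x (List.mem_cons_of_mem y h1)

-- Source B's `while todo:` loop: extract the minimum, remove it (first occurrence, as
-- Python list.remove), update the deficit count and the two tracked points.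
-- `(… ).getD []` is unreachable: the minimum is a member, so remove? succeeds.
def bLoop (todo : List (Int × Int)) (a b ans : Int) : Int :=
  match todo with
  | [] => ans
  | t :: rest =>
    let m := pyMinPair t rest
    let todo' := (PySem.List.remove? (t :: rest) m).getD []
    let l := -m.2
    let need : Int := 2 - (if l ≤ a then 1 else 0) - (if l ≤ b then 1 else 0)
    bLoop todo' (if need = 2 then m.1 - 1 else if need = 1 then b else a)
      (if need = 2 then m.1 else if need = 1 then m.1 else b) (ans + need)
  termination_by todo.length
  decreasing_by
    have hm : pyMinPair t rest ∈ t :: rest := pyMinPair_mem t rest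
    rw [PySem.List.remove?_eq_some_erase (t :: rest) _ hm]
    simp only [Option.getD_some, List.length_erase_of_mem hm, List.length_cons]
    omega

def intersectionSizeTwo_alt (intervals : List (List Int)) : Int :=
  bLoop (intervals.map (fun iv => (iv.getD 1 0, -(iv.getD 0 0)))) (-1) (-1) 0

-- ===== PRECONDITION & SPEC =====
-- Pre_ excludes exactly the inputs on which Python A raises: an interval that is not
-- a length-2 list makes A's sort key or the `for l, r in intervals` unpacking raise.
def Pre_intersectionSizeTwo (intervals : List (List Int)) : Prop :=
  ∀ iv ∈ intervals, iv.length = 2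
instance (intervals : List (List Int)) : Decidable (Pre_intersectionSizeTwo intervals) := by
  unfold Pre_intersectionSizeTwo; infer_instance
def pvWitness_intersectionSizeTwo : List (List Int) := [[1, 3], [0, 2], [2, 5]]

def Spec_intersectionSizeTwo (intervals : List (List Int)) (out : Int) : Prop := out = intersectionSizeTwo_alt intervals
instance (intervals : List (List Int)) (out : Int) : Decidable (Spec_intersectionSizeTwo intervals out) := by unfold Spec_intersectionSizeTwo; infer_instance

-- ===== CLAIM (what is proved, stated in full; the proofs are below) =====
def Claim_equal_intersectionSizeTwo : Prop := ∀ (intervals : List (List Int)), Dom_intersectionSizeTwo intervals → Pre_intersectionSizeTwo intervals → Spec_intersectionSizeTwo intervals (intersectionSizeTwo intervals)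

-- ===== LEMMAS AND PROOFS =====

-- the abstract greedy over interval pairs that port A's fold computes
def greedy : Int → Int → List (Int × Int) → Int
  | _, _, [] => 0
  | a, b, I :: rest =>
    if b < I.1 then 2 + greedy (I.2 - 1) I.2 rest
    else if a < I.1 then 1 + greedy b I.2 rest
    else greedy a b rest

-- order produced by A's sort key (end asc, start desc), on (start, end) pairs
def ivOrd (x y : Int × Int) : Prop := x.2 < y.2 ∨ (x.2 = y.2 ∧ y.1 ≤ x.1)

-- lexicographic ≤ on the encoded (end, -start) pairs B works with
def lexLe (p q : Int × Int) : Prop := p.1 < q.1 ∨ (p.1 = q.1 ∧ p.2 ≤ q.2)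

def toIv (iv : List Int) : Int × Int := (iv.getD 0 0, iv.getD 1 0)
def encIv (I : Int × Int) : Int × Int := (I.2, -I.1)

lemma pyMinPair_isMin (x : Int × Int) (xs : List (Int × Int)) :
    ∀ y ∈ x :: xs, lexLe (pyMinPair x xs) y := by
  unfold pyMinPair
  induction xs generalizing x with
  | nil =>
    intro y hy
    simp only [List.mem_singleton] at hy
    rw [hy]
    exact Or.inr ⟨rfl, le_rfl⟩
  | cons z zs ih =>
    intro y hy
    simp only [List.foldl_cons]
    by_cases h : z.1 < x.1 ∨ (z.1 = x.1 ∧ z.2 < x.2)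
    · rw [if_pos h]
      rcases List.mem_cons.mp hy with h1 | h1
      · have hz := ih z z (by simp)
        rw [h1]
        unfold lexLe at hz ⊢
        omega
      · exact ih z y h1
    · rw [if_neg h]
      rcases List.mem_cons.mp hy with h1 | h1
      · rw [h1]; exact ih x x (by simp)
      · rcases List.mem_cons.mp h1 with h2 | h2
        · have hx := ih x x (by simp)
          rw [h2]
          unfold lexLe at hx ⊢
          omega
        · exact ih x y (by simp [h2])

-- the selection sequence Source B's loop works through
def extractSeq (todo : List (Int × Int)) : List (Int × Int) :=
  match todo with
  | [] => []
  | t :: rest =>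
    let m := pyMinPair t rest
    m :: extractSeq ((PySem.List.remove? (t :: rest) m).getD [])
  termination_by todo.length
  decreasing_by
    have hm : pyMinPair t rest ∈ t :: rest := pyMinPair_mem t rest
    rw [PySem.List.remove?_eq_some_erase (t :: rest) _ hm]
    simp only [Option.getD_some, List.length_erase_of_mem hm, List.length_cons]
    omega

-- the state update of Source B's loop body, as a fold over the selection sequence
def gBlist : List (Int × Int) → Int → Int → Int → Int
  | [], _, _, ans => ans
  | m :: rest, a, b, ans =>
    let l := -m.2
    let need : Int := 2 - (if l ≤ a then 1 else 0) - (if l ≤ b then 1 else 0)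
    gBlist rest (if need = 2 then m.1 - 1 else if need = 1 then b else a)
      (if need = 2 then m.1 else if need = 1 then m.1 else b) (ans + need)

lemma bLoop_eq_gBlist : ∀ (n : Nat) (todo : List (Int × Int)), todo.length = n →
    ∀ a b ans, bLoop todo a b ans = gBlist (extractSeq todo) a b ans := by
  intro n
  induction n using Nat.strong_induction_on with
  | _ n ih =>
    intro todo hlen a b ans
    match todo with
    | [] => rw [bLoop, extractSeq]; rfl
    | t :: rest =>
      rw [bLoop, extractSeq]
      have hm : pyMinPair t rest ∈ t :: rest := pyMinPair_mem t rest
      have hrem := PySem.List.remove?_eq_some_erase (t :: rest) _ hm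
      have hlt : ((PySem.List.remove? (t :: rest) (pyMinPair t rest)).getD []).length < n := by
        rw [hrem]
        simp only [Option.getD_some, List.length_erase_of_mem hm, List.length_cons]
        simp only [List.length_cons] at hlen
        omega
      simp only [gBlist]
      exact ih _ hlt _ rfl _ _ _

lemma extractSeq_perm : ∀ (n : Nat) (todo : List (Int × Int)), todo.length = n →
    (extractSeq todo).Perm todo := by
  intro n
  induction n using Nat.strong_induction_on with
  | _ n ih =>
    intro todo hlen
    match todo with
    | [] => rw [extractSeq]
    | t :: rest =>
      rw [extractSeq]
      have hm : pyMinPair t rest ∈ t :: rest := pyMinPair_mem t rest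
      have hrem := PySem.List.remove?_eq_some_erase (t :: rest) _ hm
      have hlt : ((PySem.List.remove? (t :: rest) (pyMinPair t rest)).getD []).length < n := by
        rw [hrem]
        simp only [Option.getD_some, List.length_erase_of_mem hm, List.length_cons]
        simp only [List.length_cons] at hlen
        omega
      have hp := ih _ hlt _ rfl
      rw [hrem] at hp ⊢
      simp only [Option.getD_some] at hp ⊢
      exact (hp.cons _).trans (List.perm_cons_erase hm).symm

lemma extractSeq_sorted : ∀ (n : Nat) (todo : List (Int × Int)), todo.length = n →
    (extractSeq todo).Pairwise lexLe := by
  intro n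
  induction n using Nat.strong_induction_on with
  | _ n ih =>
    intro todo hlen
    match todo with
    | [] => rw [extractSeq]; exact List.Pairwise.nil
    | t :: rest =>
      rw [extractSeq]
      have hm : pyMinPair t rest ∈ t :: rest := pyMinPair_mem t rest
      have hrem := PySem.List.remove?_eq_some_erase (t :: rest) _ hm
      have hlt : ((PySem.List.remove? (t :: rest) (pyMinPair t rest)).getD []).length < n := by
        rw [hrem]
        simp only [Option.getD_some, List.length_erase_of_mem hm, List.length_cons]
        simp only [List.length_cons] at hlen
        omega
      refine List.pairwise_cons.mpr ⟨?_, ih _ hlt _ rfl⟩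
      intro y hy
      have hmem : y ∈ t :: rest := by
        have hp := extractSeq_perm _ ((PySem.List.remove? (t :: rest) (pyMinPair t rest)).getD []) rfl
        have : y ∈ (PySem.List.remove? (t :: rest) (pyMinPair t rest)).getD [] := hp.mem_iff.mp hy
        rw [hrem] at this
        simp only [Option.getD_some] at this
        exact List.mem_of_mem_erase this
      exact pyMinPair_isMin t rest y hmem

-- insertion sort (PySem.List.sorted2) yields a Pairwise-ordered list
lemma insertBy_pairwise {α : Type} (R : α → α → Prop) (before : α → α → Bool)
    (htrans : ∀ u v w, R u v → R v w → R u w)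
    (h1 : ∀ u v, before u v = true → R u v) (h2 : ∀ u v, before u v = false → R v u)
    (x : α) : ∀ (ys : List α), ys.Pairwise R → (PySem.List.insertBy before x ys).Pairwise R := by
  intro ys
  induction ys with
  | nil => intro _; simp [PySem.List.insertBy]
  | cons y ys ih =>
    intro hp
    rw [List.pairwise_cons] at hp
    by_cases hb : before x y
    · have he : PySem.List.insertBy before x (y :: ys) = x :: y :: ys := by
        simp [PySem.List.insertBy, hb]
      rw [he, List.pairwise_cons]
      refine ⟨?_, List.pairwise_cons.mpr hp⟩
      intro z hz
      rcases List.mem_cons.mp hz with h | h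
      · rw [h]; exact h1 x y hb
      · exact htrans _ _ _ (h1 x y hb) (hp.1 z h)
    · have he : PySem.List.insertBy before x (y :: ys) = y :: PySem.List.insertBy before x ys := by
        simp [PySem.List.insertBy, hb]
      rw [he, List.pairwise_cons]
      refine ⟨?_, ih hp.2⟩
      intro z hz
      rcases (PySem.List.mem_insertBy before x z ys).mp hz with h | h
      · rw [h]; exact h2 x y (by simpa using hb)
      · exact hp.1 z h

lemma foldl_insertBy_pairwise {α : Type} (R : α → α → Prop) (before : α → α → Bool)
    (htrans : ∀ u v w, R u v → R v w → R u w)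
    (h1 : ∀ u v, before u v = true → R u v) (h2 : ∀ u v, before u v = false → R v u) :
    ∀ (xs acc : List α), acc.Pairwise R →
      (xs.foldl (fun acc x => PySem.List.insertBy before x acc) acc).Pairwise R := by
  intro xs
  induction xs with
  | nil => intro acc h; exact h
  | cons x xs ih =>
    intro acc h
    exact ih _ (insertBy_pairwise R before htrans h1 h2 x acc h)

lemma sorted2_pairwise_int {α : Type} (xs : List α) (k1 k2 : α → Int) :
    (PySem.List.sorted2 xs k1 k2).Pairwise
      (fun u v => k1 u < k1 v ∨ (k1 u = k1 v ∧ k2 u ≤ k2 v)) := by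
  unfold PySem.List.sorted2
  apply foldl_insertBy_pairwise _ _ ?_ ?_ ?_ xs [] List.Pairwise.nil
  · intro u v w h1 h2
    rcases h1 with h1 | ⟨h1, h1'⟩ <;> rcases h2 with h2 | ⟨h2, h2'⟩
    · exact Or.inl (by omega)
    · exact Or.inl (by omega)
    · exact Or.inl (by omega)
    · exact Or.inr (by omega)
  · intro u v h
    have h' : (decide (k1 u < k1 v) || (!decide (k1 v < k1 u) && decide (k2 u < k2 v))) = true := h
    simp only [Bool.or_eq_true, Bool.and_eq_true, Bool.not_eq_true', decide_eq_true_eq,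
      decide_eq_false_iff_not] at h'
    rcases h' with h | ⟨ha, hb⟩
    · exact Or.inl h
    · by_cases c1 : k1 u < k1 v
      · exact Or.inl c1
      · exact Or.inr ⟨by omega, by omega⟩
  · intro u v h
    have h' : (decide (k1 u < k1 v) || (!decide (k1 v < k1 u) && decide (k2 u < k2 v))) = false := h
    simp only [Bool.or_eq_false_iff, Bool.and_eq_false_iff, Bool.not_eq_false',
      decide_eq_true_eq, decide_eq_false_iff_not] at h'
    obtain ⟨ha, hb⟩ := h'
    by_cases c : k1 v < k1 u
    · exact Or.inl c
    · rcases hb with hb | hb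
      · exact absurd hb c
      · exact Or.inr ⟨by omega, by omega⟩

-- A's loop body on interval pairs
def stepA : (Int × Int × Int) → (Int × Int) → (Int × Int × Int) := fun st I =>
  if st.2.2 < I.1 then (st.1 + 2, I.2 - 1, I.2)
  else if st.2.1 < I.1 then (st.1 + 1, st.2.2, I.2)
  else st

lemma foldl_stepA : ∀ (ys : List (Int × Int)) (ans a b : Int),
    (ys.foldl stepA (ans, a, b)).1 = ans + greedy a b ys := by
  intro ys
  induction ys with
  | nil => intro ans a b; simp [greedy]
  | cons I rest ih =>
    intro ans a b
    simp only [List.foldl_cons, stepA, greedy]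
    by_cases h1 : b < I.1
    · simp only [if_pos h1, ih]; omega
    · by_cases h2 : a < I.1
      · simp only [if_neg h1, if_pos h2, ih]; omega
      · simp only [if_neg h1, if_neg h2, ih]

lemma portA_eq (intervals : List (List Int)) :
    intersectionSizeTwo intervals =
      greedy (-1) (-1)
        ((PySem.List.sorted2 intervals (fun x => x.getD 1 0) (fun x => -(x.getD 0 0))).map toIv) := by
  have h := foldl_stepA
    ((PySem.List.sorted2 intervals (fun x => x.getD 1 0) (fun x => -(x.getD 0 0))).map toIv)
    0 (-1) (-1)
  rw [List.foldl_map] at h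
  simpa using h

-- B's deficit fold agrees with A's greedy whenever the sequence is sorted and the
-- state satisfies the loop invariant (a ≤ b, and b is -1 only together with a,
-- or b stays below every upcoming right end)
lemma gBlist_eq_greedy : ∀ (ys : List (Int × Int)) (a b ans : Int),
    ys.Pairwise ivOrd → a ≤ b → ((a = -1 ∧ b = -1) ∨ ∀ I ∈ ys, b ≤ I.2) →
    gBlist (ys.map encIv) a b ans = ans + greedy a b ys := by
  intro ys
  induction ys with
  | nil => intro a b ans _ _ _; simp [gBlist, greedy]
  | cons I rest ih =>
    intro a b ans hs hab hinv
    have hsrel : ∀ J ∈ rest, ivOrd I J := (List.pairwise_cons.mp hs).1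
    have hs' := (List.pairwise_cons.mp hs).2
    have hbr : ∀ J ∈ rest, I.2 ≤ J.2 := by
      intro J hJ
      rcases hsrel J hJ with h | ⟨h1, h2⟩ <;> unfold ivOrd at * <;> omega
    simp only [List.map_cons, gBlist, encIv, neg_neg, greedy]
    by_cases hbl : b < I.1
    · have hna : ¬ I.1 ≤ a := by omega
      have hnb : ¬ I.1 ≤ b := by omega
      rw [if_neg hna, if_neg hnb]
      norm_num
      rw [ih (I.2 - 1) I.2 (ans + 2) hs' (by omega) (Or.inr hbr)]
      omega
    · by_cases hal : a < I.1
      · have hna : ¬ I.1 ≤ a := by omega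
        have hyb : I.1 ≤ b := by omega
        rw [if_neg hna, if_pos hyb]
        norm_num
        have hble : b ≤ I.2 := by
          rcases hinv with ⟨h1, h2⟩ | h
          · omega
          · exact h I (by simp)
        rw [ih b I.2 (ans + 1) hs' hble (Or.inr hbr)]
        omega
      · have hya : I.1 ≤ a := by omega
        have hyb : I.1 ≤ b := by omega
        rw [if_pos hya, if_pos hyb, if_neg hbl, if_neg hal]
        norm_num
        apply ih a b ans hs' hab
        rcases hinv with h | h
        · exact Or.inl h
        · exact Or.inr (fun J hJ => h J (by simp [hJ]))

-- ===== VERDICT (by name: the statement is the Claim_ definition above) =====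
theorem intersectionSizeTwo_spec : Claim_equal_intersectionSizeTwo := by
  intro intervals _ _
  unfold Spec_intersectionSizeTwo
  set LA := ((PySem.List.sorted2 intervals (fun x => x.getD 1 0) (fun x => -(x.getD 0 0))).map toIv) with hLAdef
  have hpA : LA.Pairwise ivOrd := by
    rw [hLAdef, List.pairwise_map]
    apply (sorted2_pairwise_int intervals (fun x => x.getD 1 0) (fun x => -(x.getD 0 0))).imp
    intro u v h
    unfold ivOrd toIv
    rcases h with h | ⟨h1, h2⟩
    · exact Or.inl h
    · exact Or.inr ⟨h1, by omega⟩
  -- the selection sequence of B's worklist is exactly the encoded sorted list of A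
  have hsel : extractSeq (intervals.map (fun iv => (iv.getD 1 0, -(iv.getD 0 0)))) = LA.map encIv := by
    apply List.Perm.eq_of_pairwise (le := lexLe)
    · intro p q _ _ h1 h2
      unfold lexLe at h1 h2
      have hp1 : p.1 = q.1 := by omega
      have hp2 : p.2 = q.2 := by omega
      exact Prod.ext hp1 hp2
    · exact extractSeq_sorted _ _ rfl
    · rw [List.pairwise_map]
      apply hpA.imp
      intro u v h
      unfold ivOrd at h
      unfold lexLe encIv
      rcases h with h | ⟨h1, h2⟩
      · exact Or.inl h
      · exact Or.inr ⟨h1, by omega⟩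
    · -- both are permutations of the encoded input list
      have h1 := extractSeq_perm _ (intervals.map (fun iv => (iv.getD 1 0, -(iv.getD 0 0)))) rfl
      have h2 : (LA.map encIv).Perm (intervals.map (fun iv => (iv.getD 1 0, -(iv.getD 0 0)))) := by
        rw [hLAdef, List.map_map]
        have hperm := (PySem.List.sorted2_perm intervals
          (fun x => x.getD 1 0) (fun x => -(x.getD 0 0)) false).map (encIv ∘ toIv)
        apply hperm.trans
        apply List.Perm.of_eq
        apply List.map_congr_left
        intro iv _
        rfl
      exact h1.trans h2.symm
  rw [portA_eq, ← hLAdef]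
  unfold intersectionSizeTwo_alt
  rw [bLoop_eq_gBlist _ _ rfl, hsel,
    gBlist_eq_greedy LA (-1) (-1) 0 hpA le_rfl (Or.inl ⟨rfl, rfl⟩)]
  omega
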